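-- pv_equiv track=rewrite | github.com/PeterSK-bit/advent-of-code-2023 | day-13/a.py | find_reflection
-- ===== SOURCE A (Python) =====
-- def find_reflection(array:list[str],multiplier = 1) -> int:
--     result = 0
--     for index in range(len(array)-1):
--         if array[index] == array[index+1]:
--             for i in range(1, index+1 if index+1 < len(array)-(index+1) else len(array)-(index+1)):
--                 if array[index-i] != array[index+1+i]:
--                         break
--             else:
--                 result += (index+1)*multiplier
--                 break
--     return result
-- ===== SOURCE B (Python) =====
-- def find_reflection(array: list[str], multiplier=1) -> int:
--     for p in range(1, len(array)):
--         top = array[:p][::-1]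
--         bottom = array[p:]
--         if all(t == b for t, b in zip(top, bottom)):
--             return p * multiplier
--     return 0
-- ===== Notes on version B (the rewrite author's own statement) =====
-- stated objective: simpler
-- what changed: Replaces A's adjacent-equality gate plus an expanding index loop with a single ascending scan over split positions, each tested by zipping the reversed prefix against the suffix and returning at the first symmetric split.
import Mathlib
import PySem

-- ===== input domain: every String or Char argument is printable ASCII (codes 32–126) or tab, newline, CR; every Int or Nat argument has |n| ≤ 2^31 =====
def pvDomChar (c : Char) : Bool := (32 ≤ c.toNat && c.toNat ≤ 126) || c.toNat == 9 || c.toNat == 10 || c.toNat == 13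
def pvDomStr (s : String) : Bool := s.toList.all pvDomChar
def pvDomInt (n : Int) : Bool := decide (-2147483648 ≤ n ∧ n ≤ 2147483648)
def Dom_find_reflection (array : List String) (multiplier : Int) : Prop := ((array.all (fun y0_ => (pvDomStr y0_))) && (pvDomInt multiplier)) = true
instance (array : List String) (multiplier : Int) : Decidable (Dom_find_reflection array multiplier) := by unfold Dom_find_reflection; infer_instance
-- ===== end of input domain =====

-- B replaces A's adjacent-equality gate + expanding index loop by a scan over split
-- positions comparing reversed prefix with suffix (objective: simpler; same cost).

-- ===== PORT A =====
-- inner for-else loop of A: true = loop finished without break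
def find_reflection_innerLoop (array : List String) (index : Int) : List Int → Bool
  | [] => true
  | i :: rest =>
    if PySem.List.pyGetD array (index - i) "" != PySem.List.pyGetD array (index + 1 + i) "" then
      false
    else
      find_reflection_innerLoop array index rest

-- outer loop of A: result is 0 unless a reflection is found, then (index+1)*multiplier and break
def find_reflection_loop (array : List String) (multiplier : Int) : List Int → Int
  | [] => 0
  | index :: rest =>
    if PySem.List.pyGetD array index "" == PySem.List.pyGetD array (index + 1) "" then
      if find_reflection_innerLoop array index
          (PySem.List.pyRange 1
            (if index + 1 < (array.length : Int) - (index + 1) then index + 1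
             else (array.length : Int) - (index + 1)) 1) then
        (index + 1) * multiplier
      else
        find_reflection_loop array multiplier rest
    else
      find_reflection_loop array multiplier rest

def find_reflection (array : List String) (multiplier : Int) : Int :=
  find_reflection_loop array multiplier (PySem.List.pyRange 0 ((array.length : Int) - 1) 1)

-- ===== PORT B =====
def find_reflection_alt_loop (array : List String) (multiplier : Int) : List Int → Int
  | [] => 0
  | p :: rest =>
    let top := (PySem.List.slice array none (some p)).reverse
    let bottom := PySem.List.slice array (some p) none
    if (top.zip bottom).all (fun tb => tb.1 == tb.2) then
      p * multiplier
    else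
      find_reflection_alt_loop array multiplier rest

def find_reflection_alt (array : List String) (multiplier : Int) : Int :=
  find_reflection_alt_loop array multiplier (PySem.List.pyRange 1 (array.length : Int) 1)

-- ===== PRECONDITION & SPEC =====
def Spec_find_reflection (array : List String) (multiplier : Int) (out : Int) : Prop := out = find_reflection_alt array multiplier
instance (array : List String) (multiplier : Int) (out : Int) : Decidable (Spec_find_reflection array multiplier out) := by unfold Spec_find_reflection; infer_instance

-- ===== CLAIM (what is proved, stated in full; the proofs are below) =====
def Claim_equal_find_reflection : Prop := ∀ (array : List String) (multiplier : Int), Dom_find_reflection array multiplier → Spec_find_reflection array multiplier (find_reflection array multiplier)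

-- ===== LEMMAS AND PROOFS =====

-- rewriting a getElem index
theorem getElem_idx_congr {α : Type} (l : List α) {i j : Nat} (hij : i = j) (hi : i < l.length) :
    l[i]'hi = l[j]'(hij ▸ hi) := by subst hij; rfl

-- A's inner loop is an 'all' over its range
theorem innerLoop_eq_all (array : List String) (index : Int) (l : List Int) :
    find_reflection_innerLoop array index l
      = l.all (fun i => PySem.List.pyGetD array (index - i) "" == PySem.List.pyGetD array (index + 1 + i) "") := by
  induction l with
  | nil => rfl
  | cons i rest ih =>
    simp only [find_reflection_innerLoop, List.all_cons, bne]
    by_cases h : PySem.List.pyGetD array (index - i) "" = PySem.List.pyGetD array (index + 1 + i) ""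
    · simp [h, ih]
    · simp [h]

-- zip-all of string equality, as a pointwise statement
theorem zip_all_eq_true_iff (l1 l2 : List String) :
    (((l1.zip l2).all fun tb => tb.1 == tb.2) = true)
      ↔ ∀ (j : Nat) (h1 : j < l1.length) (h2 : j < l2.length), l1[j] = l2[j] := by
  rw [List.all_eq_true]
  constructor
  · intro h j h1 h2
    have hj : j < (l1.zip l2).length := by simp [List.length_zip]; omega
    have hmem : (l1[j], l2[j]) ∈ l1.zip l2 := by
      have := List.getElem_mem hj
      rwa [List.getElem_zip] at this
    simpa using h _ hmem
  · intro h x hx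
    obtain ⟨j, hj, rfl⟩ := List.getElem_of_mem hx
    have h1 : j < l1.length := by simp [List.length_zip] at hj; omega
    have h2 : j < l2.length := by simp [List.length_zip] at hj; omega
    rw [List.getElem_zip]
    simpa using h j h1 h2

-- equivalence of A's condition at index k with B's condition at split k+1
theorem cond_iff (array : List String) (k : Nat) (h : k + 1 < array.length) :
    ((PySem.List.pyGetD array (k : Int) "" == PySem.List.pyGetD array ((k : Int) + 1) "")
      && find_reflection_innerLoop array (k : Int)
          (PySem.List.pyRange 1
            (if (k : Int) + 1 < (array.length : Int) - ((k : Int) + 1) then (k : Int) + 1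
             else (array.length : Int) - ((k : Int) + 1)) 1))
    = (((PySem.List.slice array none (some ((k : Int) + 1))).reverse.zip
          (PySem.List.slice array (some ((k : Int) + 1)) none)).all fun tb => tb.1 == tb.2) := by
  rw [PySem.List.slice_to array (by omega), PySem.List.slice_from array (by omega),
      show ((k : Int) + 1).toNat = k + 1 from by omega]
  rw [Bool.eq_iff_iff, zip_all_eq_true_iff]
  rw [Bool.and_eq_true, beq_iff_eq, innerLoop_eq_all, List.all_eq_true]
  have hmin : min (k + 1) array.length = k + 1 := by omega
  have hk0 : PySem.List.pyGetD array (k : Int) "" = array[k]'(by omega) := by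
    rw [PySem.List.pyGetD_eq_getElem array "" (by omega) (by omega)]
    rw [getElem_idx_congr array (show ((k : Int)).toNat = k by omega)]
  have hk1 : PySem.List.pyGetD array ((k : Int) + 1) "" = array[k + 1]'h := by
    rw [PySem.List.pyGetD_eq_getElem array "" (by omega) (by omega)]
    rw [getElem_idx_congr array (show ((k : Int) + 1).toNat = k + 1 by omega)]
  constructor
  · rintro ⟨hadj, hall⟩ j h1 h2
    rw [List.length_reverse, List.length_take, hmin] at h1
    rw [List.length_drop] at h2
    rw [List.getElem_reverse, List.getElem_take, List.getElem_drop]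
    rw [getElem_idx_congr array
        (show (array.take (k + 1)).length - 1 - j = k - j by
          simp only [List.length_take, hmin]; omega)]
    by_cases hj : j = 0
    · subst hj
      rw [hk0, hk1] at hadj
      simpa using hadj
    · have hmem : ((j : Int)) ∈ PySem.List.pyRange 1
          (if (k : Int) + 1 < (array.length : Int) - ((k : Int) + 1) then (k : Int) + 1
           else (array.length : Int) - ((k : Int) + 1)) 1 := by
        rw [PySem.List.mem_pyRange_one]
        refine ⟨by omega, ?_⟩
        by_cases hc : (k : Int) + 1 < (array.length : Int) - ((k : Int) + 1)
        · rw [if_pos hc]; omega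
        · rw [if_neg hc]; omega
      have hq := hall _ hmem
      rw [beq_iff_eq,
          PySem.List.pyGetD_eq_getElem array "" (by omega) (by omega),
          PySem.List.pyGetD_eq_getElem array "" (by omega) (by omega)] at hq
      rw [getElem_idx_congr array (show ((k : Int) - (j : Int)).toNat = k - j by omega),
          getElem_idx_congr array (show ((k : Int) + 1 + (j : Int)).toNat = k + 1 + j by omega)] at hq
      exact hq
  · intro hall
    constructor
    · have h1 : (0 : Nat) < (array.take (k + 1)).reverse.length := by
        simp only [List.length_reverse, List.length_take, hmin]; omega
      have h2 : (0 : Nat) < (array.drop (k + 1)).length := by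
        simp only [List.length_drop]; omega
      have hadj := hall 0 h1 h2
      rw [List.getElem_reverse, List.getElem_take, List.getElem_drop] at hadj
      rw [getElem_idx_congr array
            (show (array.take (k + 1)).length - 1 - 0 = k by
              simp only [List.length_take, hmin]; omega),
          getElem_idx_congr array (show k + 1 + 0 = k + 1 by omega)] at hadj
      rw [hk0, hk1]
      exact hadj
    · intro i hi
      rw [PySem.List.mem_pyRange_one] at hi
      obtain ⟨hi1, hi2⟩ := hi
      have hboth : i < (k : Int) + 1 ∧ i < (array.length : Int) - ((k : Int) + 1) := by
        by_cases hc : (k : Int) + 1 < (array.length : Int) - ((k : Int) + 1)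
        · rw [if_pos hc] at hi2; omega
        · rw [if_neg hc] at hi2; omega
      obtain ⟨hb1, hb2⟩ := hboth
      have hj1 : i.toNat < (array.take (k + 1)).reverse.length := by
        simp only [List.length_reverse, List.length_take, hmin]; omega
      have hj2 : i.toNat < (array.drop (k + 1)).length := by
        simp only [List.length_drop]; omega
      have hq := hall i.toNat hj1 hj2
      rw [List.getElem_reverse, List.getElem_take, List.getElem_drop] at hq
      rw [getElem_idx_congr array
            (show (array.take (k + 1)).length - 1 - i.toNat = k - i.toNat by
              simp only [List.length_take, hmin]; omega)] at hq
      rw [beq_iff_eq,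
          PySem.List.pyGetD_eq_getElem array "" (by omega) (by omega),
          PySem.List.pyGetD_eq_getElem array "" (by omega) (by omega)]
      rw [getElem_idx_congr array (show ((k : Int) - i).toNat = k - i.toNat by omega),
          getElem_idx_congr array (show ((k : Int) + 1 + i).toNat = k + 1 + i.toNat by omega)]
      exact hq

-- the two loops agree when run over matching index lists
theorem loops_eq (array : List String) (m : Int) (l : List Int)
    (hl : ∀ k ∈ l, 0 ≤ k ∧ k + 1 < (array.length : Int)) :
    find_reflection_loop array m l
      = find_reflection_alt_loop array m (l.map (fun k => k + 1)) := by
  induction l with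
  | nil => rfl
  | cons k rest ih =>
    obtain ⟨hk0, hk1⟩ := hl k (by simp)
    have hrest : ∀ x ∈ rest, 0 ≤ x ∧ x + 1 < (array.length : Int) := fun x hx => hl x (by simp [hx])
    obtain ⟨k', rfl⟩ : ∃ k' : Nat, ((k' : Int)) = k := ⟨k.toNat, by omega⟩
    have hc := cond_iff array k' (by omega)
    simp only [List.map_cons, find_reflection_loop, find_reflection_alt_loop]
    by_cases hadj : (PySem.List.pyGetD array (k' : Int) "" == PySem.List.pyGetD array ((k' : Int) + 1) "") = true
    · rw [if_pos hadj]
      rw [hadj, Bool.true_and] at hc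
      by_cases hin : find_reflection_innerLoop array (k' : Int)
          (PySem.List.pyRange 1
            (if (k' : Int) + 1 < (array.length : Int) - ((k' : Int) + 1) then (k' : Int) + 1
             else (array.length : Int) - ((k' : Int) + 1)) 1) = true
      · rw [if_pos hin, if_pos (hc ▸ hin)]
      · rw [if_neg hin, if_neg (hc ▸ hin)]
        exact ih hrest
    · rw [if_neg hadj]
      have hnot : ¬ (((PySem.List.slice array none (some ((k' : Int) + 1))).reverse.zip
          (PySem.List.slice array (some ((k' : Int) + 1)) none)).all fun tb => tb.1 == tb.2) = true := by
        rw [← hc]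
        simp only [Bool.and_eq_true]
        tauto
      rw [if_neg hnot]
      exact ih hrest

-- ===== VERDICT (by name: the statement is the Claim_ definition above) =====
theorem find_reflection_spec : Claim_equal_find_reflection := by
  intro array multiplier _
  unfold Spec_find_reflection find_reflection find_reflection_alt
  have hrange : PySem.List.pyRange 1 (array.length : Int) 1
      = (PySem.List.pyRange 0 ((array.length : Int) - 1) 1).map (fun k => k + 1) := by
    rw [PySem.List.pyRange_one, PySem.List.pyRange_one, List.map_map]
    rw [show ((array.length : Int) - 1 - 0) = ((array.length : Int) - 1) from by ring]
    exact List.map_congr_left (fun x _ => by simp [Function.comp]; omega)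
  rw [hrange]
  exact loops_eq array multiplier _ (fun k hk => by
    rw [PySem.List.mem_pyRange_one] at hk
    omega)
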